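-- pv_equiv track=rewrite | github.com/emarteca/Resynchronizer | reorder_me.py | build_paren_stack
-- ===== SOURCE A (Python) =====
-- def corresp_paren(p):
-- 	return {
-- 		'(' : ')',
-- 		')' : '(',
-- 		'[' : ']',
-- 		']' : '[',
-- 		'{' : '}',
-- 		'}' : '{'
-- 	}.get(p, p) # just return p itself as a default if it's not in the dict
--
-- def build_paren_stack( a_string):
-- 	paren_stack = ""
-- 	for c in a_string:
-- 		if c == "(" or c == "{" or c == "[":
-- 			paren_stack += c
-- 		elif c == ")" or c == "}" or c == "]":
-- 			if len(paren_stack) > 0 and paren_stack[-1] == corresp_paren(c):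
-- 				paren_stack = paren_stack[ : -1]
-- 			else:
-- 				paren_stack += c
-- 	return( paren_stack)
-- ===== SOURCE B (Python) =====
-- # B: right-to-left single pass building the result back-to-front (vs A's left-to-right stack).
-- CLOSE = {'(': ')', '[': ']', '{': '}'}
--
-- def build_paren_stack(a_string):
--     out = []  # holds the result reversed: out[-1] is the first char of the answer so far
--     for c in reversed(a_string):
--         if c in CLOSE:
--             if out and out[-1] == CLOSE[c]:
--                 out.pop()
--             else:
--                 out.append(c)
--         elif c in (')', ']', '}'):
--             out.append(c)
--     return ''.join(reversed(out))
-- ===== Notes on version B (the rewrite author's own statement) =====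
-- stated objective: alternative
-- what changed: B scans the string right-to-left once, building the result back-to-front and cancelling an opener against the matching closer at the head of the partial result, instead of A's left-to-right stack with push/pop at the top; a confluence-style argument shows both reach the same normal form.
import Mathlib
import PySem

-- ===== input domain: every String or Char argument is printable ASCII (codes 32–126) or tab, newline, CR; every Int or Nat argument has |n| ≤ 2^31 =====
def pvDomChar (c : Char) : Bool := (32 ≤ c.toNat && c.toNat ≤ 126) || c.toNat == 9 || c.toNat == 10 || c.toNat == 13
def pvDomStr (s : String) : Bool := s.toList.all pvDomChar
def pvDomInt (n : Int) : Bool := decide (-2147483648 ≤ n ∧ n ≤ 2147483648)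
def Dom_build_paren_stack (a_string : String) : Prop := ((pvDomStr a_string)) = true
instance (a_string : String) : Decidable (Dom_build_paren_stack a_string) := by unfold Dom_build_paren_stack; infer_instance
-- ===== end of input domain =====

-- B scans right-to-left building the result back-to-front instead of A's left-to-right stack; same output, proved via a normal-form argument.

-- ===== PORT A =====
def corresp_paren (p : Char) : Char :=
  PySem.Dict.getD (PySem.Dict.ofList
    [('(', ')'), (')', '('), ('[', ']'), (']', '['), ('{', '}'), ('}', '{')]) p p

-- loop body of A (the Python string is ported as its list of characters)
def stepA (paren_stack : List Char) (c : Char) : List Char :=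
  if c = '(' ∨ c = '{' ∨ c = '[' then paren_stack ++ [c]
  else if c = ')' ∨ c = '}' ∨ c = ']' then
    if 0 < paren_stack.length ∧ PySem.List.pyGet? paren_stack (-1) = some (corresp_paren c)
    then PySem.List.slice paren_stack none (some (-1))
    else paren_stack ++ [c]
  else paren_stack

def build_paren_stack (a_string : String) : String :=
  String.mk (a_string.toList.foldl stepA [])

-- ===== PORT B =====
def closeOf (c : Char) : Char := if c = '(' then ')' else if c = '[' then ']' else '}'

-- loop body of B's reversed-order loop: r is B's `out` read back-to-front (r.head = out[-1])
def pushB (c : Char) (r : List Char) : List Char :=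
  if c = '(' ∨ c = '[' ∨ c = '{' then
    if r.head? = some (closeOf c) then r.tail else c :: r
  else if c = ')' ∨ c = ']' ∨ c = '}' then c :: r
  else r

def build_paren_stack_alt (a_string : String) : String :=
  String.mk (a_string.toList.foldr pushB [])

-- ===== PRECONDITION & SPEC =====
def Spec_build_paren_stack (a_string : String) (out : String) : Prop := out = build_paren_stack_alt a_string
instance (a_string : String) (out : String) : Decidable (Spec_build_paren_stack a_string out) := by unfold Spec_build_paren_stack; infer_instance

-- ===== CLAIM (what is proved, stated in full; the proofs are below) =====
def Claim_equal_build_paren_stack : Prop := ∀ (a_string : String), Dom_build_paren_stack a_string → Spec_build_paren_stack a_string (build_paren_stack a_string)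

-- ===== LEMMAS AND PROOFS =====

def isBr (c : Char) : Prop :=
  c = '(' ∨ c = ')' ∨ c = '[' ∨ c = ']' ∨ c = '{' ∨ c = '}'

-- "no adjacent matched pair" relation
def Rnf (a b : Char) : Prop := ¬ ((a = '(' ∨ a = '[' ∨ a = '{') ∧ b = closeOf a)

lemma stepA_push (acc : List Char) (c : Char) (h : c = '(' ∨ c = '{' ∨ c = '[') :
    stepA acc c = acc ++ [c] := by
  unfold stepA; rw [if_pos h]

lemma stepA_pop (acc : List Char) (c : Char) (h : c = '(' ∨ c = '{' ∨ c = '[') :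
    stepA (acc ++ [c]) (closeOf c) = acc := by
  rcases h with h | h | h <;> subst h <;>
    (simp [stepA, closeOf, PySem.List.pyGet?_neg_one_append_singleton,
      PySem.List.slice_to_neg_one]; decide)

lemma normBrackets : ∀ s : List Char,
    (∀ c ∈ s.foldr pushB [], isBr c) ∧ List.IsChain Rnf (s.foldr pushB []) := by
  intro s
  induction s with
  | nil => exact ⟨fun c h => absurd h (by simp), List.isChain_nil⟩
  | cons c s ih =>
    obtain ⟨hbr, hch⟩ := ih
    simp only [List.foldr_cons]
    generalize s.foldr pushB [] = r at hbr hch ⊢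
    unfold pushB
    by_cases h1 : c = '(' ∨ c = '[' ∨ c = '{'
    · rw [if_pos h1]
      by_cases hd : r.head? = some (closeOf c)
      · rw [if_pos hd]
        exact ⟨fun x hx => hbr x (List.mem_of_mem_tail hx), hch.tail⟩
      · rw [if_neg hd]
        refine ⟨?_, ?_⟩
        · intro x hx
          rcases List.mem_cons.mp hx with h | h
          · subst h; rcases h1 with h | h | h <;> subst h <;> simp [isBr]
          · exact hbr x h
        · refine List.isChain_cons.mpr ⟨?_, hch⟩
          intro b hb hcon
          exact hd (by rw [hb, hcon.2])
    · rw [if_neg h1]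
      by_cases h2 : c = ')' ∨ c = ']' ∨ c = '}'
      · rw [if_pos h2]
        refine ⟨?_, ?_⟩
        · intro x hx
          rcases List.mem_cons.mp hx with h | h
          · subst h; rcases h2 with h | h | h <;> subst h <;> simp [isBr]
          · exact hbr x h
        · refine List.isChain_cons.mpr ⟨?_, hch⟩
          intro b _ hcon
          exact h1 hcon.1
      · rw [if_neg h2]
        exact ⟨hbr, hch⟩

lemma foldl_norm : ∀ (s : List Char) (acc : List Char),
    s.foldl stepA acc = (s.foldr pushB []).foldl stepA acc := by
  intro s
  induction s with
  | nil => intro acc; rfl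
  | cons c s ih =>
    intro acc
    simp only [List.foldl_cons, List.foldr_cons]
    rw [ih (stepA acc c)]
    generalize s.foldr pushB [] = r
    unfold pushB
    by_cases h1 : c = '(' ∨ c = '[' ∨ c = '{'
    · rw [if_pos h1]
      have h1' : c = '(' ∨ c = '{' ∨ c = '[' := by tauto
      by_cases hd : r.head? = some (closeOf c)
      · obtain ⟨t, ht⟩ : ∃ t, r = closeOf c :: t := by
          cases r with
          | nil => simp at hd
          | cons a t => rw [List.head?_cons, Option.some.injEq] at hd; exact ⟨t, by rw [hd]⟩
        subst ht
        rw [if_pos hd, List.tail_cons, List.foldl_cons, stepA_push acc c h1',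
          stepA_pop acc c h1']
      · rw [if_neg hd, List.foldl_cons, stepA_push acc c h1']
    · rw [if_neg h1]
      by_cases h2 : c = ')' ∨ c = ']' ∨ c = '}'
      · rw [if_pos h2, List.foldl_cons]
      · rw [if_neg h2]
        have : stepA acc c = acc := by
          unfold stepA
          rw [if_neg (by tauto : ¬(c = '(' ∨ c = '{' ∨ c = '[')),
            if_neg (by tauto : ¬(c = ')' ∨ c = '}' ∨ c = ']'))]
        rw [this]

lemma foldl_fixed : ∀ (r acc : List Char), (∀ c ∈ r, isBr c) → List.IsChain Rnf (acc ++ r) →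
    r.foldl stepA acc = acc ++ r := by
  intro r
  induction r with
  | nil => intro acc _ _; simp
  | cons c r ih =>
    intro acc hbr hch
    have hstep : stepA acc c = acc ++ [c] := by
      have hc := hbr c (by simp)
      unfold stepA
      split_ifs with h1 h2 h3
      · rfl
      · -- pop case: contradicts IsChain at the junction
        exfalso
        obtain ⟨hlen, hget⟩ := h3
        rw [PySem.List.pyGet?_neg_one] at hget
        have hjunct := (List.isChain_append.mp hch).2.2
        have hR : Rnf (corresp_paren c) c := hjunct _ hget _ rfl
        apply hR
        rcases h2 with h | h | h <;> subst h <;> exact (by decide)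
      · rfl
      · exfalso
        rcases hc with h | h | h | h | h | h <;> subst h <;> simp at h1 h2
    rw [List.foldl_cons, hstep, ih (acc ++ [c]) (fun x hx => hbr x (by simp [hx]))
      (by rw [List.append_assoc]; simpa using hch)]
    simp

-- ===== VERDICT (by name: the statement is the Claim_ definition above) =====
theorem build_paren_stack_spec : Claim_equal_build_paren_stack := by
  intro s _
  show build_paren_stack s = build_paren_stack_alt s
  unfold build_paren_stack build_paren_stack_alt
  obtain ⟨hbr, hch⟩ := normBrackets s.toList
  rw [foldl_norm, foldl_fixed _ [] hbr (by simpa using hch), List.nil_append]
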